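-- pv_equiv track=rewrite | github.com/s6fikass/Chatbot_KVNN | corpus/textdata.py | get_kb_mask
-- ===== SOURCE A (Python) =====
-- def get_kb_mask(sentence, kb):
--     kb_mask = sentence[:]
--     for i, word in enumerate(sentence):
--         for triple in kb:
--             if triple[0] == word or triple[2] == word:
--                 kb_mask[i]=1
--                 break
--             else:
--                 kb_mask[i]=0
--
--     assert len(kb_mask) == len(sentence)
--
--     return kb_mask
-- ===== SOURCE B (Python) =====
-- def get_kb_mask(sentence, kb):
--     positions = {}
--     for i, w in enumerate(sentence):
--         positions.setdefault(w, []).append(i)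
--     mask = [0] * len(sentence)
--     for triple in kb:
--         for key in (triple[0], triple[2]):
--             for j in positions.get(key, ()):
--                 mask[j] = 1
--     return mask
-- ===== Notes on version B (the rewrite author's own statement) =====
-- stated objective: faster
-- what changed: B inverts the loop structure: it builds an index dict mapping each word to its list of positions in sentence, initializes an all-zero mask, and then iterates over the KB triples writing 1 at the indexed positions of each triple's head and tail entity, instead of A's per-word scan of the whole KB with break/else flag writes.
-- intended difference: When kb is empty and sentence contains a nonzero word, A's inner loop never runs and it returns the sentence itself instead of a 0/1 mask; B returns the all-zero mask, which is the intended value for a mask function. — e.g. on get_kb_mask([5], []): A returns [5], B returns [0]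
-- outside the precondition, e.g. on get_kb_mask([1], [[1]]): A returns [1], B raises IndexError
import Mathlib
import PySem

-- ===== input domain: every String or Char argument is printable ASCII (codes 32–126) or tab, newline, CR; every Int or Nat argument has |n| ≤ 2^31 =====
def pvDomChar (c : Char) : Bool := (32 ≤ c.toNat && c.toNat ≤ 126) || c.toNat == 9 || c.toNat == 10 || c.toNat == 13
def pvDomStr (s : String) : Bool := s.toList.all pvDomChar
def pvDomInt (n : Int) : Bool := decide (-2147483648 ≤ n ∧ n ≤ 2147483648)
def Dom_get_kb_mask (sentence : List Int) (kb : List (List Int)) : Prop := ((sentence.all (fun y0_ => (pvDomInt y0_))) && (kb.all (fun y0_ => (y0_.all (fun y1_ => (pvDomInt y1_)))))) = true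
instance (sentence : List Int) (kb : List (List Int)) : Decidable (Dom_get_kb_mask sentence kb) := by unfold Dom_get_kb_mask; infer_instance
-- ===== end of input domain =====

-- B inverts the loop structure: it indexes the positions of each word in sentence once, starts from
-- an all-zero mask and writes 1s while iterating over the KB triples (objective: faster, asymptotic).
-- On empty kb A returns the sentence unchanged (a quirk); B returns the all-zero mask — see D_ below.

-- ===== PORT A =====
-- inner 'for triple in kb: … break / else kb_mask[i]=0' loop; cur is the current kb_mask[i].
-- triple[0] / triple[2] are PySem.List.pyGet? …; under Pre_ (every triple has length ≥ 3) the
-- .getD 0 default is never taken, so the access is exact there.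
def pvInnerA (word : Int) : List (List Int) → Int → Int
  | [], cur => cur
  | t :: rest, _ =>
      if ((PySem.List.pyGet? t 0).getD 0 == word) || ((PySem.List.pyGet? t 2).getD 0 == word)
      then 1 else pvInnerA word rest 0

-- kb_mask = sentence[:]; for i, word in enumerate(sentence): kb_mask[i] = <inner loop result>
def get_kb_mask (sentence : List Int) (kb : List (List Int)) : List Int :=
  (PySem.List.enumerate sentence).foldl
    (fun mask p => PySem.List.pySetD mask p.1 (pvInnerA p.2 kb (PySem.List.pyGetD mask p.1 0)))
    sentence

-- ===== PORT B =====
-- positions = {}; for i, w in enumerate(sentence): positions.setdefault(w, []).append(i)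
def pvPositions (sentence : List Int) : PySem.Dict Int (List Int) :=
  (PySem.List.enumerate sentence).foldl
    (fun d p => d.modify p.2 [] (· ++ [p.1])) PySem.Dict.empty

-- mask = [0]*len(sentence); for triple in kb: for key in (triple[0], triple[2]):
--   for j in positions.get(key, ()): mask[j] = 1
def get_kb_mask_alt (sentence : List Int) (kb : List (List Int)) : List Int :=
  kb.foldl
    (fun mask t =>
      [(PySem.List.pyGet? t 0).getD 0, (PySem.List.pyGet? t 2).getD 0].foldl
        (fun m k =>
          ((pvPositions sentence).getD k []).foldl (fun m j => PySem.List.pySetD m j 1) m)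
        mask)
    (List.replicate sentence.length 0)

-- ===== PRECONDITION & SPEC =====
-- Pre_ excludes KBs containing a triple of length < 3: there Python A raises IndexError unless an
-- earlier/leading match short-circuits past triple[2] (then A returns but B itself raises IndexError).
def Pre_get_kb_mask (_sentence : List Int) (kb : List (List Int)) : Prop :=
  ∀ t ∈ kb, 3 ≤ t.length
instance (sentence : List Int) (kb : List (List Int)) : Decidable (Pre_get_kb_mask sentence kb) := by
  unfold Pre_get_kb_mask; infer_instance

def pvWitness_get_kb_mask : List Int × List (List Int) := ([1, 2], [[1, 0, 9]])

-- When kb is empty and sentence contains a nonzero word, A's inner loop never runs and it returns the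
-- sentence itself instead of a 0/1 mask; B returns the all-zero mask, the intended value for a mask.
def D_get_kb_mask (sentence : List Int) (kb : List (List Int)) : Prop :=
  kb = [] ∧ ∃ w ∈ sentence, w ≠ 0
instance (sentence : List Int) (kb : List (List Int)) : Decidable (D_get_kb_mask sentence kb) := by
  unfold D_get_kb_mask; infer_instance

def Spec_get_kb_mask (sentence : List Int) (kb : List (List Int)) (out : List Int) : Prop :=
  ¬ D_get_kb_mask sentence kb → out = get_kb_mask_alt sentence kb
instance (sentence : List Int) (kb : List (List Int)) (out : List Int) : Decidable (Spec_get_kb_mask sentence kb out) := by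
  unfold Spec_get_kb_mask; infer_instance

def pvDiffWitness_get_kb_mask : List Int × List (List Int) := ([5], [])
def pvDiffWitnessOut_get_kb_mask : (List Int) × (List Int) := ([5], [0])

-- ===== CLAIM (what is proved, stated in full; the proofs are below) =====
def Claim_unchanged_get_kb_mask : Prop := ∀ (sentence : List Int) (kb : List (List Int)), Dom_get_kb_mask sentence kb → Pre_get_kb_mask sentence kb → Spec_get_kb_mask sentence kb (get_kb_mask sentence kb)
def Claim_changed_get_kb_mask : Prop := Dom_get_kb_mask (pvDiffWitness_get_kb_mask.1) (pvDiffWitness_get_kb_mask.2) ∧ Pre_get_kb_mask (pvDiffWitness_get_kb_mask.1) (pvDiffWitness_get_kb_mask.2) ∧ D_get_kb_mask (pvDiffWitness_get_kb_mask.1) (pvDiffWitness_get_kb_mask.2) ∧ get_kb_mask (pvDiffWitness_get_kb_mask.1) (pvDiffWitness_get_kb_mask.2) = pvDiffWitnessOut_get_kb_mask.1 ∧ get_kb_mask_alt (pvDiffWitness_get_kb_mask.1) (pvDiffWitness_get_kb_mask.2) = pvDiffWitnessOut_get_kb_mask.2 ∧ pvDiffWitnessOut_get_kb_mask.1 ≠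 pvDiffWitnessOut_get_kb_mask.2
def Claim_exact_get_kb_mask : Prop := ∀ (sentence : List Int) (kb : List (List Int)), Dom_get_kb_mask sentence kb → Pre_get_kb_mask sentence kb → D_get_kb_mask sentence kb → get_kb_mask sentence kb ≠ get_kb_mask_alt sentence kb

-- ===== LEMMAS AND PROOFS =====

-- the triple-matches-word condition both programs test (abbrev: decidability by unfolding)
abbrev pvMatch (t : List Int) (w : Int) : Prop :=
  (PySem.List.pyGet? t 0).getD 0 = w ∨ (PySem.List.pyGet? t 2).getD 0 = w

-- A's outer loop over enumerate(sentence) writing into a copy of sentence is element-wise map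
lemma foldA_eq_map (kb : List (List Int)) :
    ∀ (l pref : List Int),
      (PySem.List.enumerate l (pref.length : Int)).foldl
        (fun mask p => PySem.List.pySetD mask p.1 (pvInnerA p.2 kb (PySem.List.pyGetD mask p.1 0)))
        (pref ++ l)
      = pref ++ l.map (fun w => pvInnerA w kb w) := by
  intro l
  induction l with
  | nil => intro pref; simp [PySem.List.enumerate_nil]
  | cons w rest ih =>
    intro pref
    rw [PySem.List.enumerate_cons, List.foldl_cons]
    have hget : PySem.List.pyGetD (pref ++ w :: rest) (pref.length : Int) 0 = w := by
      rw [PySem.List.pyGetD_natCast]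
      simp [List.getD]
    have hset : PySem.List.pySetD (pref ++ w :: rest) (pref.length : Int)
        (pvInnerA w kb w) = (pref ++ [pvInnerA w kb w]) ++ rest := by
      rw [PySem.List.pySetD_natCast]
      simp [List.append_assoc]
    rw [hget, hset]
    have hlen : ((pref.length : Int) + 1) = (((pref ++ [pvInnerA w kb w]).length : Int)) := by
      simp
    rw [hlen, ih (pref ++ [pvInnerA w kb w])]
    simp

lemma get_kb_mask_eq_map (sentence : List Int) (kb : List (List Int)) :
    get_kb_mask sentence kb = sentence.map (fun w => pvInnerA w kb w) := by
  have h := foldA_eq_map kb sentence []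
  simpa [get_kb_mask] using h

-- characterisation of A's inner loop for a nonempty kb
lemma innerA_char (w : Int) :
    ∀ (kb : List (List Int)) (c : Int), kb ≠ [] →
      pvInnerA w kb c = if ∃ t ∈ kb, pvMatch t w then 1 else 0 := by
  intro kb
  induction kb with
  | nil => intro c h; exact absurd rfl h
  | cons t rest ih =>
    intro c _
    by_cases hm : pvMatch t w
    · have hb : (((PySem.List.pyGet? t 0).getD 0 == w) || ((PySem.List.pyGet? t 2).getD 0 == w)) = true := by
        rcases hm with h | h <;> simp [h]
      simp only [pvInnerA, hb]
      simp [hm]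
    · have h1 : ¬ (PySem.List.pyGet? t 0).getD 0 = w := fun h => hm (Or.inl h)
      have h2 : ¬ (PySem.List.pyGet? t 2).getD 0 = w := fun h => hm (Or.inr h)
      have hb : (((PySem.List.pyGet? t 0).getD 0 == w) || ((PySem.List.pyGet? t 2).getD 0 == w)) = false := by
        simp [h1, h2]
      simp only [pvInnerA, hb, Bool.false_eq_true, if_false]
      cases rest with
      | nil => simp [pvInnerA, hm]
      | cons u us =>
        rw [ih 0 (by simp)]
        simp [hm]

-- B's positions dict: the value at key k is the list of (Int) indices where sentence has k
lemma pvPositions_getD (s : List Int) (k : Int) :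
    (pvPositions s).getD k []
      = ((PySem.List.enumerate s).filter (fun p => p.2 == k)).map (·.1) := by
  unfold pvPositions
  have hmap :
      (PySem.List.enumerate s).foldl (fun d p => d.modify p.2 [] (· ++ [p.1])) PySem.Dict.empty
        = ((PySem.List.enumerate s).map Prod.swap).foldl
            (fun d p => d.modify p.1 [] (· ++ [p.2])) PySem.Dict.empty := by
    rw [List.foldl_map]
    rfl
  rw [hmap, PySem.Dict.getD_foldl_modify_append, PySem.Dict.getD_empty]
  rw [List.filter_map, List.map_map]
  simp [Function.comp_def]

lemma mem_pvPositions (s : List Int) (k j : Int) :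
    j ∈ (pvPositions s).getD k []
      ↔ ∃ (i : Nat), ∃ h : i < s.length, s[i] = k ∧ j = (i : Int) := by
  rw [pvPositions_getD]
  simp only [List.mem_map, List.mem_filter, PySem.List.mem_enumerate_iff]
  constructor
  · rintro ⟨p, ⟨⟨i, hi, rfl⟩, hk⟩, rfl⟩
    simp only [beq_iff_eq] at hk
    exact ⟨i, hi, hk, by simp⟩
  · rintro ⟨i, hi, hk, rfl⟩
    exact ⟨((i : Int), s[i]), ⟨⟨i, hi, by simp⟩, by simp [hk]⟩, rfl⟩

-- one inner write loop: sets 1 at each listed (valid Nat) index, leaves the rest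
lemma writeOnes_len :
    ∀ (ps : List Int) (m : List Int),
      (ps.foldl (fun m j => PySem.List.pySetD m j 1) m).length = m.length := by
  intro ps
  induction ps with
  | nil => intro m; rfl
  | cons j ps ih =>
    intro m
    rw [List.foldl_cons, ih]
    exact PySem.List.length_pySetD m j 1

lemma writeOnes_getD (i : Nat) :
    ∀ (ps : List Int) (m : List Int),
      (∀ x ∈ ps, ∃ a : Nat, a < m.length ∧ x = (a : Int)) → i < m.length →
      PySem.List.pyGetD (ps.foldl (fun m j => PySem.List.pySetD m j 1) m) (i : Int) 0
        = if (i : Int) ∈ ps then 1 else PySem.List.pyGetD m (i : Int) 0 := by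
  intro ps
  induction ps with
  | nil => intro m _ _; simp
  | cons j ps ih =>
    intro m hval hi
    obtain ⟨a, ha, rfl⟩ := hval j (by simp)
    rw [List.foldl_cons]
    have hlen : (PySem.List.pySetD m (a : Int) 1).length = m.length :=
      PySem.List.length_pySetD m _ 1
    have hval' : ∀ x ∈ ps, ∃ b : Nat, b < (PySem.List.pySetD m (a : Int) 1).length ∧ x = (b : Int) := by
      intro x hx
      obtain ⟨b, hb, rfl⟩ := hval x (by simp [hx])
      exact ⟨b, by omega, rfl⟩
    rw [ih _ hval' (by omega)]
    rw [PySem.List.pyGetD_pySetD_natCast _ _ _ _ _ ha]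
    by_cases hmem : (i : Int) ∈ ps
    · simp only [if_pos hmem, List.mem_cons, if_pos (Or.inr hmem)]
    · by_cases hia : i = a
      · simp only [if_neg hmem, if_pos hia, List.mem_cons]
        rw [if_pos (Or.inl (by exact_mod_cast hia))]
      · simp only [if_neg hmem, if_neg hia, List.mem_cons]
        rw [if_neg (fun h => h.elim (fun h' => hia (by exact_mod_cast h')) hmem)]

-- one triple step of B's outer loop, elementwise
lemma tripleStep_getD (s : List Int) (t : List Int) (m : List Int) (i : Nat)
    (hm : m.length = s.length) (hi : i < s.length) :
    PySem.List.pyGetD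
      ([(PySem.List.pyGet? t 0).getD 0, (PySem.List.pyGet? t 2).getD 0].foldl
        (fun m k =>
          ((pvPositions s).getD k []).foldl (fun m j => PySem.List.pySetD m j 1) m)
        m) (i : Int) 0
      = if pvMatch t s[i] then 1 else PySem.List.pyGetD m (i : Int) 0 := by
  have hval : ∀ (k : Int) (len : Nat), len = s.length →
      ∀ x ∈ (pvPositions s).getD k [], ∃ a : Nat, a < len ∧ x = (a : Int) := by
    intro k len hlenEq x hx
    obtain ⟨a, ha, _, rfl⟩ := (mem_pvPositions s k x).mp hx
    exact ⟨a, by omega, rfl⟩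
  have hmem : ∀ k : Int, ((i : Int) ∈ (pvPositions s).getD k []) ↔ s[i] = k := by
    intro k
    rw [mem_pvPositions]
    constructor
    · rintro ⟨a, ha, hk, hia⟩
      have : i = a := by exact_mod_cast hia
      subst this; exact hk
    · intro hk; exact ⟨i, hi, hk, rfl⟩
  simp only [List.foldl_cons, List.foldl_nil]
  have hlen0 : (((pvPositions s).getD ((PySem.List.pyGet? t 0).getD 0) []).foldl
      (fun m j => PySem.List.pySetD m j 1) m).length = m.length :=
    writeOnes_len _ m
  rw [writeOnes_getD i _ _ (by rw [hlen0, hm]; exact hval _ _ rfl) (by omega)]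
  rw [writeOnes_getD i _ m (by rw [hm]; exact hval _ _ rfl) (by omega)]
  simp only [hmem]
  unfold pvMatch
  by_cases h0 : s[i] = (PySem.List.pyGet? t 0).getD 0 <;>
    by_cases h2 : s[i] = (PySem.List.pyGet? t 2).getD 0
  · rw [if_pos h2, if_pos (Or.inl h0.symm)]
  · rw [if_neg h2, if_pos h0, if_pos (Or.inl h0.symm)]
  · rw [if_pos h2, if_pos (Or.inr h2.symm)]
  · rw [if_neg h2, if_neg h0,
      if_neg (fun h => h.elim (fun h' => h0 h'.symm) (fun h' => h2 h'.symm))]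

-- B's whole kb fold, elementwise
lemma kbFold_getD (s : List Int) (i : Nat) (hi : i < s.length) :
    ∀ (kb : List (List Int)) (m : List Int), m.length = s.length →
      PySem.List.pyGetD
        (kb.foldl
          (fun mask t =>
            [(PySem.List.pyGet? t 0).getD 0, (PySem.List.pyGet? t 2).getD 0].foldl
              (fun m k =>
                ((pvPositions s).getD k []).foldl (fun m j => PySem.List.pySetD m j 1) m)
              mask)
          m) (i : Int) 0
        = if ∃ t ∈ kb, pvMatch t s[i] then 1 else PySem.List.pyGetD m (i : Int) 0 := by
  intro kb
  induction kb with
  | nil => intro m _; simp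
  | cons t rest ih =>
    intro m hm
    rw [List.foldl_cons]
    have hlen : ([(PySem.List.pyGet? t 0).getD 0, (PySem.List.pyGet? t 2).getD 0].foldl
        (fun m k =>
          ((pvPositions s).getD k []).foldl (fun m j => PySem.List.pySetD m j 1) m)
        m).length = s.length := by
      simp only [List.foldl_cons, List.foldl_nil]
      rw [writeOnes_len, writeOnes_len, hm]
    rw [ih _ hlen, tripleStep_getD s t m i hm hi]
    by_cases hr : ∃ u ∈ rest, pvMatch u s[i] <;> by_cases ht : pvMatch t s[i] <;>
      simp [hr, ht]

lemma kbFold_len (s : List Int) (kb : List (List Int)) (m : List Int) :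
    (kb.foldl
      (fun mask t =>
        [(PySem.List.pyGet? t 0).getD 0, (PySem.List.pyGet? t 2).getD 0].foldl
          (fun m k =>
            ((pvPositions s).getD k []).foldl (fun m j => PySem.List.pySetD m j 1) m)
          mask)
      m).length = m.length := by
  induction kb generalizing m with
  | nil => rfl
  | cons t rest ih =>
    rw [List.foldl_cons, ih]
    simp only [List.foldl_cons, List.foldl_nil]
    rw [writeOnes_len, writeOnes_len]

-- B computes the elementwise mask
lemma altB_eq_map (sentence : List Int) (kb : List (List Int)) :
    get_kb_mask_alt sentence kb
      = sentence.map (fun w => if ∃ t ∈ kb, pvMatch t w then 1 else 0) := by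
  unfold get_kb_mask_alt
  apply List.ext_getElem
  · rw [kbFold_len]; simp
  · intro i hi1 hi2
    have hiS : i < sentence.length := by simpa using hi2
    have h := kbFold_getD sentence i hiS kb (List.replicate sentence.length 0) (by simp)
    have hgd : ∀ (l : List Int) (h : i < l.length), PySem.List.pyGetD l (i : Int) 0 = l[i] := by
      intro l h
      rw [PySem.List.pyGetD_natCast]
      exact List.getD_eq_getElem l 0 h
    rw [hgd _ hi1] at h
    rw [h]
    simp [hiS]

-- ===== VERDICT (by name: the statement is the Claim_ definition above) =====
theorem get_kb_mask_spec : Claim_unchanged_get_kb_mask := by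
  intro sentence kb _ _ hnd
  rw [get_kb_mask_eq_map, altB_eq_map]
  cases kb with
  | nil =>
    have hall : ∀ w ∈ sentence, w = 0 := by
      intro w hw
      by_contra hz
      exact hnd ⟨rfl, w, hw, hz⟩
    apply List.map_congr_left
    intro w hw
    simp [pvInnerA, hall w hw]
  | cons t rest =>
    apply List.map_congr_left
    intro w _
    rw [innerA_char w (t :: rest) w (by simp)]

theorem get_kb_mask_changed : Claim_changed_get_kb_mask := by
  unfold Claim_changed_get_kb_mask; decide

theorem get_kb_mask_tight : Claim_exact_get_kb_mask := by
  intro sentence kb _ _ hd heq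
  obtain ⟨hkb, w, hw, hz⟩ := hd
  subst hkb
  rw [get_kb_mask_eq_map, altB_eq_map] at heq
  have h1 : sentence.map (fun w => pvInnerA w ([] : List (List Int)) w) = sentence := by
    calc sentence.map (fun w => pvInnerA w ([] : List (List Int)) w)
        = sentence.map id := by apply List.map_congr_left; intro x _; simp [pvInnerA]
      _ = sentence := List.map_id sentence
  rw [h1] at heq
  have : w ∈ sentence.map (fun w => if ∃ t ∈ ([] : List (List Int)), pvMatch t w then 1 else 0) := by
    rw [← heq]; exact hw
  simp at this
  exact hz this.2
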